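-- pv_equiv track=rewrite | github.com/xizqu/FR_AI_Script | AI Script Pro Compiler.py | reversebytes
-- ===== SOURCE A (Python) =====
-- def reversebytes(string):
--     ns = ''
--     inter = ''
--     counter = 0
--     for a in string:
--         if counter == 1:
--             inter += a
--             ns = inter + ns
--             inter = ''
--             counter = 0
--         else:
--             inter += a
--             counter += 1
--     return ns
-- ===== SOURCE B (Python) =====
-- def reversebytes(string):
--     m = len(string) // 2
--     return ''.join(string[2 * i:2 * i + 2] for i in range(m - 1, -1, -1))
-- ===== Notes on version B (the rewrite author's own statement) =====
-- stated objective: faster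
-- what changed: Replaces the character-by-character loop that prepends each completed 2-char pair to the front of the accumulated string (quadratic string copying) by a single join of the 2-char slices taken at pair indices in descending order (m = len//2 drops an odd trailing character, as A does).
import Mathlib
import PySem

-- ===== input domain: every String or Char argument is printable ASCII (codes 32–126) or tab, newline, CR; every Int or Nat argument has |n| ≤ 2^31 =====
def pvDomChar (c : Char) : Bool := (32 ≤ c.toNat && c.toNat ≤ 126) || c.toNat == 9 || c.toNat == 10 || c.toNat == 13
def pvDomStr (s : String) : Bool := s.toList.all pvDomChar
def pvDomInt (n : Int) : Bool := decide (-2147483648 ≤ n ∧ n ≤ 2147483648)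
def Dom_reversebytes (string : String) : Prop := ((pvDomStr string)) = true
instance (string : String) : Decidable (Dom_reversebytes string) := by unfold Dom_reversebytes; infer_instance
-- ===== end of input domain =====

-- B replaces A's character loop (which prepends each completed 2-char pair to the front of
-- the accumulated string) by a single join of the 2-char slices at pair indices in
-- descending order (objective: faster; a timing run measured B faster).

-- ===== PORT A =====
-- A's per-character loop step over the state (ns, inter, counter)
def revStep (st : List Char × List Char × Int) (a : Char) : List Char × List Char × Int :=
  if st.2.2 = 1 then
    (st.2.1 ++ [a] ++ st.1, [], 0)
  else
    (st.1, st.2.1 ++ [a], st.2.2 + 1)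

def reversebytes (string : String) : String :=
  String.mk (string.toList.foldl revStep ([], [], 0)).1

-- ===== PORT B =====
def reversebytes_alt (string : String) : String :=
  let s := string.toList
  let m : Int := PySem.Int.floordiv (s.length : Int) 2
  String.mk
    (((PySem.List.pyRange (m - 1) (-1) (-1)).map
        (fun i => PySem.List.slice s (some (2 * i)) (some (2 * i + 2)))).flatten)

-- ===== PRECONDITION & SPEC =====
def Spec_reversebytes (string : String) (out : String) : Prop := out = reversebytes_alt string
instance (string : String) (out : String) : Decidable (Spec_reversebytes string out) := by unfold Spec_reversebytes; infer_instance

-- ===== CLAIM (what is proved, stated in full; the proofs are below) =====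
def Claim_equal_reversebytes : Prop := ∀ (string : String), Dom_reversebytes string → Spec_reversebytes string (reversebytes string)

-- ===== LEMMAS AND PROOFS =====

-- the common characterisation: pairs of the list, last pair first
def pairsRev : List Char → List Char
  | a :: b :: t => pairsRev t ++ [a, b]
  | _ => []

theorem loopA_eq (l : List Char) : ∀ ns : List Char,
    (l.foldl revStep (ns, [], 0)).1 = pairsRev l ++ ns := by
  induction l using pairsRev.induct with
  | case1 a b t ih =>
      intro ns
      simp only [List.foldl, revStep]
      norm_num
      rw [ih]
      simp [pairsRev]
  | case2 l h =>
      match l with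
      | [] => intro ns; simp [pairsRev]
      | [a] => intro ns; simp [List.foldl, revStep, pairsRev]
      | a :: b :: t => exact (h a b t rfl).elim

theorem altCore_eq (l : List Char) :
    (((PySem.List.pyRange (PySem.Int.floordiv (l.length : Int) 2 - 1) (-1) (-1)).map
        (fun i => PySem.List.slice l (some (2 * i)) (some (2 * i + 2)))).flatten)
      = pairsRev l := by
  induction l using pairsRev.induct with
  | case1 a b t ih =>
      have hm : PySem.Int.floordiv ((a :: b :: t).length : Int) 2
          = PySem.Int.floordiv ((t.length : Int)) 2 + 1 := by
        have h1 : PySem.Int.floordiv ((a :: b :: t).length : Int) 2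
            = ((((a :: b :: t).length) / 2 : Nat) : Int) := by
          exact_mod_cast PySem.Int.floordiv_natCast (a :: b :: t).length 2
        have h2 : PySem.Int.floordiv ((t.length : Int)) 2 = (((t.length) / 2 : Nat) : Int) := by
          exact_mod_cast PySem.Int.floordiv_natCast t.length 2
        rw [h1, h2]
        have h3 : (a :: b :: t).length / 2 = t.length / 2 + 1 := by
          simp [List.length_cons]; omega
        rw [h3]; push_cast; ring
      set mt : Int := PySem.Int.floordiv ((t.length : Int)) 2 with hmt
      have hmt0 : 0 ≤ mt := by
        have h4 : mt = (((t.length) / 2 : Nat) : Int) := by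
          exact_mod_cast PySem.Int.floordiv_natCast t.length 2
        rw [h4]; positivity
      rw [hm]
      have e : mt + 1 - 1 = mt := by ring
      rw [e, PySem.List.pyRange_neg_one_eq_reverse]
      have hr : PySem.List.pyRange ((-1 : Int) + 1) (mt + 1) 1
          = 0 :: PySem.List.pyRange 1 (mt + 1) 1 := by
        have := PySem.List.pyRange_one_cons (a := (-1 : Int) + 1) (b := mt + 1) (by omega)
        simpa using this
      rw [hr]
      simp only [List.reverse_cons, List.map_append, List.map_cons, List.map_nil,
        List.flatten_append, List.flatten_cons, List.flatten_nil, List.append_nil]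
      -- shift: slices of a::b::t at indices 1..mt are slices of t at 0..mt-1
      have hshift : (PySem.List.pyRange 1 (mt + 1) 1).map
            (fun i => PySem.List.slice (a :: b :: t) (some (2 * i)) (some (2 * i + 2)))
          = (PySem.List.pyRange 0 mt 1).map
            (fun i => PySem.List.slice t (some (2 * i)) (some (2 * i + 2))) := by
        rw [PySem.List.pyRange_one (a := 1) (b := mt + 1),
            PySem.List.pyRange_one (a := 0) (b := mt)]
        have hn : (mt + 1 - 1).toNat = (mt - 0).toNat := by omega
        rw [hn, List.map_map, List.map_map]
        apply List.map_congr_left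
        intro k _
        simp only [Function.comp_apply]
        have e2 : (2 : Int) * (1 + (k : Int)) + 2 = ((2 * k + 4 : Nat) : Int) := by
          push_cast; ring
        have e1 : (2 : Int) * (1 + (k : Int)) = ((2 * k + 2 : Nat) : Int) := by
          push_cast; ring
        have e4 : (2 : Int) * (0 + (k : Int)) + 2 = ((2 * k + 2 : Nat) : Int) := by
          push_cast; ring
        have e3 : (2 : Int) * (0 + (k : Int)) = ((2 * k : Nat) : Int) := by
          push_cast; ring
        rw [e2, e1, e4, e3, PySem.List.slice_natCast, PySem.List.slice_natCast]
        have hd : (a :: b :: t).drop (2 * k + 2) = t.drop (2 * k) := by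
          have h5 : 2 * k + 2 = (2 * k) + 1 + 1 := by omega
          rw [h5]
          simp [List.drop_succ_cons]
        rw [hd]
        congr 1
        omega
      rw [List.map_reverse, hshift, ← List.map_reverse]
      have hrev : PySem.List.pyRange (mt - 1) (-1) (-1)
          = (PySem.List.pyRange 0 mt 1).reverse := by
        rw [PySem.List.pyRange_neg_one_eq_reverse]; norm_num
      rw [hrev] at ih
      rw [ih]
      -- the index-0 slice is [a, b]
      have h0 : PySem.List.slice (a :: b :: t) none (some (2 : Int)) = [a, b] := by
        rw [PySem.List.slice_to]
        · rfl
        · norm_num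
      simp [pairsRev, h0]
  | case2 l h =>
      match l with
      | [] => decide
      | [a] =>
          have hm : PySem.Int.floordiv (([a] : List Char).length : Int) 2 = 0 := by
            rw [PySem.Int.floordiv_eq_ediv_of_pos (by norm_num)]
            norm_num
          rw [hm]
          rw [PySem.List.pyRange_neg_one_eq_nil (by omega : (0 : Int) - 1 ≤ -1)]
          simp [pairsRev]
      | a :: b :: t => exact (h a b t rfl).elim

-- ===== VERDICT (by name: the statement is the Claim_ definition above) =====
theorem reversebytes_spec : Claim_equal_reversebytes := by
  intro s _
  unfold Spec_reversebytes reversebytes reversebytes_alt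
  rw [loopA_eq]
  simp only [altCore_eq, List.append_nil]
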